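-- pv_equiv track=rewrite | github.com/joshlaplante/portfolio-for-JoshLaPlante | 5 smallest multiple.py | LCMList
-- ===== SOURCE A (Python) =====
-- def primeFactorize(N):
--     primeFactorList = []
--     divisor = 2
--     while divisor**2 <= N:
--         while N%divisor == 0:
--             primeFactorList.append(divisor)
--             N//=divisor
--         divisor+=1
--     if N >1:
--         primeFactorList.append(N)
--     return primeFactorList
--
-- def LCMList(num):
--     primeFactorSet = []
--     i=2
--     for i in range(num):
--         currentPrimeList = primeFactorize(i)
--         for j in currentPrimeList:
--             if j not in primeFactorSet:
--                 primeFactorSet.append(j)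
--             if j in primeFactorSet:
--                 currentCount = currentPrimeList.count(j)
--                 setCount = primeFactorSet.count(j)
--                 if currentCount > setCount:
--                     difference = currentCount - setCount
--                     for i in range(difference):
--                         primeFactorSet.append(j)
--     primeFactorSet.sort()
--     return primeFactorSet
-- ===== SOURCE B (Python) =====
-- def LCMList(num):
--     n = num - 1
--     result = []
--     for p in range(2, num):
--         # trial-division primality test
--         d = 2
--         isPrime = True
--         while d * d <= p:
--             if p % d == 0:
--                 isPrime = False
--                 break
--             d += 1
--         if isPrime:
--             # e = largest exponent with p**e <= n
--             e = 1
--             q = p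
--             while q * p <= n:
--                 q *= p
--                 e += 1
--             result.extend([p] * e)
--     return result
-- ===== Notes on version B (the rewrite author's own statement) =====
-- stated objective: faster
-- what changed: Instead of factorizing every integer below num and merging the factor multisets with repeated membership/count scans, B enumerates each prime p < num once (trial division) and appends p exactly floor(log_p(num-1)) times via repeated squaring-free multiplication, producing the already-sorted result directly.
import Mathlib
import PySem

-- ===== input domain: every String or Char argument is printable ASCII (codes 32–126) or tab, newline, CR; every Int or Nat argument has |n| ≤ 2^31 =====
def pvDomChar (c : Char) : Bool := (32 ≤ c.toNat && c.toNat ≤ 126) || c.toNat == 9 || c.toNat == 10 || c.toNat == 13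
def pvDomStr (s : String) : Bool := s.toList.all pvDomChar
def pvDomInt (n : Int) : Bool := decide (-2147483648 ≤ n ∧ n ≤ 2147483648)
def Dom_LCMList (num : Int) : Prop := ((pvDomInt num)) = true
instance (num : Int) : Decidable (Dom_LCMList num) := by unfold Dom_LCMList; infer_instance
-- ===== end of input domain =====

-- B re-implements LCMList by enumerating the primes p < num directly and appending each p
-- floor(log_p(num-1)) times (the exponent of p in lcm(1..num-1)) instead of factorizing every
-- integer below num and merging the factor multisets; measurably faster, same exact result.

-- ===== PORT A =====

-- arithmetic facts the ports' termination proofs cite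
theorem pvEdivLt (a b : ℤ) (ha : 1 ≤ a) (hb : 2 ≤ b) : a / b < a ∧ 0 ≤ a / b := by
  have hq0 : 0 ≤ a / b := Int.ediv_nonneg (by omega) (by omega)
  have hqb : a / b * b ≤ a := Int.ediv_mul_le a (by omega)
  have h2 : a / b * 2 ≤ a / b * b := mul_le_mul_of_nonneg_left (by omega) hq0
  omega

-- `while N % divisor == 0: primeFactorList.append(divisor); N //= divisor`
-- returns (appended factors, final N).  The `2 ≤ d ∧ 1 ≤ N` dite condition is a pure
-- totality guard: every actual call (from pfOuter, which starts at divisor 2) satisfies it.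
def pfInner (d N : Int) : List Int × Int :=
  if h : 2 ≤ d ∧ 1 ≤ N then
    if PySem.Int.mod N d = 0 then
      let r := pfInner d (PySem.Int.floordiv N d)
      (d :: r.1, r.2)
    else ([], N)
  else ([], N)
termination_by N.toNat
decreasing_by
  rw [PySem.Int.floordiv_eq_ediv_of_pos (by omega : (0:Int) < d)]
  have h1 := pvEdivLt N d (by omega) (by omega)
  omega

-- facts about pfInner the pfOuter termination proof cites
theorem pfInner_of_not_dvd (d N : Int) (hm : ¬ PySem.Int.mod N d = 0) : pfInner d N = ([], N) := by
  rw [pfInner]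
  split <;> simp_all

theorem pfInner_snd_le (d N : Int) : (pfInner d N).2 ≤ N ∧ (1 ≤ N → 1 ≤ (pfInner d N).2) := by
  fun_induction pfInner d N with
  | case1 N h hm r ih =>
    have hdvd : d ∣ N := (PySem.Int.mod_eq_zero_iff_dvd N d).1 hm
    have hfd : PySem.Int.floordiv N d = N / d :=
      PySem.Int.floordiv_eq_ediv_of_pos (by omega : (0:Int) < d)
    have hlt := pvEdivLt N d (by omega) (by omega)
    have h1 : 1 ≤ N / d := by
      obtain ⟨k, hk⟩ := hdvd
      have hk1 : 1 ≤ k := by nlinarith [h.1, h.2]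
      have he : N / d = k := by rw [hk, Int.mul_ediv_cancel_left _ (by omega : d ≠ 0)]
      omega
    rw [hfd] at ih
    simp only [r, hfd]
    exact ⟨le_trans ih.1 (by omega), fun _ => ih.2 h1⟩
  | case2 N h hm => omega
  | case3 N h => exact ⟨le_refl N, fun h => h⟩

theorem pfInner_snd_lt (d N : Int) (h : 2 ≤ d ∧ 1 ≤ N) (hm : PySem.Int.mod N d = 0) :
    (pfInner d N).2 < N := by
  have hle := pfInner_snd_le d (PySem.Int.floordiv N d)
  rw [pfInner, dif_pos h, if_pos hm]
  rw [PySem.Int.floordiv_eq_ediv_of_pos (by omega : (0:Int) < d)] at hle ⊢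
  have hlt := pvEdivLt N d (by omega) (by omega)
  exact lt_of_le_of_lt hle.1 hlt.1

-- `while divisor**2 <= N: <inner loop>; divisor += 1`, then `if N > 1: append(N)`.
-- The `2 ≤ d` conjunct is a pure totality guard: divisor starts at 2 and only increments.
def pfOuter (N d : Int) : List Int :=
  if h : d * d ≤ N ∧ 2 ≤ d then
    let r := pfInner d N
    r.1 ++ pfOuter r.2 (d + 1)
  else if 1 < N then [N] else []
termination_by (N.toNat, (N.toNat + 2 - d.toNat))
decreasing_by
  have hN : 1 ≤ N := by nlinarith [h.1, h.2]
  by_cases hm : PySem.Int.mod N d = 0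
  · have hlt := pfInner_snd_lt d N ⟨h.2, hN⟩ hm
    have hge := (pfInner_snd_le d N).2 hN
    left; omega
  · rw [pfInner_of_not_dvd d N hm]
    have hdd : d ≤ d * d := le_mul_of_one_le_left (by omega) (by omega)
    right; omega

def primeFactorize (N : Int) : List Int := pfOuter N 2

-- body of `for j in currentPrimeList: …` inside LCMList
def mergeStep (cur : List Int) (s : List Int) (j : Int) : List Int :=
  let s1 := if j ∈ s then s else s ++ [j]
  if j ∈ s1 then
    let currentCount : Int := PySem.List.count cur j
    let setCount : Int := PySem.List.count s1 j
    if currentCount > setCount then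
      let difference := currentCount - setCount
      (PySem.List.pyRange 0 difference 1).foldl (fun t _ => t ++ [j]) s1
    else s1
  else s1

def LCMList (num : Int) : List Int :=
  let s := (PySem.List.pyRange 0 num 1).foldl
    (fun s i =>
      let cur := primeFactorize i
      cur.foldl (fun s j => mergeStep cur s j) s) []
  PySem.List.sorted s (fun x => x) false

-- ===== PORT B =====

-- `while d*d <= p: if p % d == 0: isPrime=False; break
--                  d += 1`; the `2 ≤ d` conjunct is a pure totality guard (d starts at 2).
def isPrimeLoop (p d : Int) : Bool :=
  if h : d * d ≤ p ∧ 2 ≤ d then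
    if PySem.Int.mod p d = 0 then false
    else isPrimeLoop p (d + 1)
  else true
termination_by (p.toNat + 2 - d.toNat)
decreasing_by
  have : d ≤ d * d := le_mul_of_one_le_left (by omega) (by omega)
  omega

-- `e = 1; q = p; while q * p <= n: q *= p; e += 1`; returns (q, e).
-- The `2 ≤ p ∧ 1 ≤ q` conjuncts are pure totality guards (callers pass 2 ≤ p = q).
def powLoop (p n q e : Int) : Int × Int :=
  if h : q * p ≤ n ∧ 2 ≤ p ∧ 1 ≤ q then
    powLoop p n (q * p) (e + 1)
  else (q, e)
termination_by (n - q).toNat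
decreasing_by
  have : q * 2 ≤ q * p := by
    apply mul_le_mul_of_nonneg_left (by omega) (by omega)
  omega

def LCMList_alt (num : Int) : List Int :=
  (PySem.List.pyRange 2 num 1).foldl
    (fun res p =>
      if isPrimeLoop p 2 then
        let qe := powLoop p (num - 1) p 1
        res ++ PySem.List.pyRepeat [p] qe.2
      else res) []

-- ===== PRECONDITION & SPEC =====
def Spec_LCMList (num : Int) (out : List Int) : Prop := out = LCMList_alt num
instance (num : Int) (out : List Int) : Decidable (Spec_LCMList num out) := by unfold Spec_LCMList; infer_instance

-- ===== CLAIM (what is proved, stated in full; the proofs are below) =====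
def Claim_equal_LCMList : Prop := ∀ (num : Int), Dom_LCMList num → Spec_LCMList num (LCMList num)

-- ===== LEMMAS AND PROOFS =====

-- "p has no divisor between 2 and p" — primality, phrased over Int as the ports see it
def IsPLike (p : Int) : Prop := 2 ≤ p ∧ ∀ k : Int, 2 ≤ k → k < p → ¬ k ∣ p

theorem isPLike_iff (p : Int) (hp : 2 ≤ p) : IsPLike p ↔ p.toNat.Prime := by
  rw [Nat.prime_def_lt]
  constructor
  · rintro ⟨h2, hnd⟩
    refine ⟨by omega, fun m hm hdvd => ?_⟩
    by_contra hm1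
    have hm2 : 2 ≤ m := by
      rcases (by omega : m < 2 ∨ 2 ≤ m) with h | h
      · interval_cases m
        · simp at hdvd; omega
        · omega
      · exact h
    refine hnd (m : Int) (by exact_mod_cast hm2) (by omega) ?_
    have : (m : Int) ∣ (p.toNat : Int) := Int.natCast_dvd_natCast.2 hdvd
    rwa [Int.toNat_of_nonneg (by omega)] at this
  · rintro ⟨h2, hnd⟩
    refine ⟨hp, fun k hk2 hkp hdvd => ?_⟩
    have hk : k.toNat ∣ p.toNat := by
      have : (k.toNat : Int) ∣ (p.toNat : Int) := by
        rw [Int.toNat_of_nonneg (by omega), Int.toNat_of_nonneg (by omega)]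
        exact hdvd
      exact_mod_cast this
    have := hnd k.toNat (by omega) hk
    omega

-- trial division up to the square root suffices
theorem prime_of_no_small_divisor (p d : Int) (hp : 1 < p) (hd2 : 2 ≤ d) (hlt : p < d * d)
    (hinv : ∀ k : Int, 2 ≤ k → k < d → ¬ k ∣ p) : IsPLike p := by
  refine ⟨by omega, fun k hk2 hkp hdvd => ?_⟩
  obtain ⟨c, hc⟩ := hdvd
  have hc2 : 2 ≤ c := by
    by_contra hcon
    rcases (by omega : c ≤ 0 ∨ c = 1) with h0 | h1
    · nlinarith
    · rw [h1, mul_one] at hc; omega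
  rcases (by omega : k ≤ c ∨ c < k) with h | h
  · have hkd : k < d := by nlinarith
    exact hinv k hk2 hkd ⟨c, hc⟩
  · have hcd : c < d := by nlinarith
    have hcp : c < p := by nlinarith
    exact hinv c hc2 hcd ⟨k, by linarith [hc, mul_comm k c]⟩

theorem pfInner_spec (d N : Int) (h2 : 2 ≤ d) : 1 ≤ N →
    (pfInner d N).1 = List.replicate (pfInner d N).1.length d ∧
    N = (pfInner d N).2 * d ^ (pfInner d N).1.length ∧
    ¬ d ∣ (pfInner d N).2 ∧ 1 ≤ (pfInner d N).2 := by
  fun_induction pfInner d N with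
  | case1 N h hm r ih =>
    intro h1
    have hdvd : d ∣ N := (PySem.Int.mod_eq_zero_iff_dvd N d).1 hm
    have hfd : PySem.Int.floordiv N d = N / d :=
      PySem.Int.floordiv_eq_ediv_of_pos (by omega : (0:Int) < d)
    have h1' : 1 ≤ N / d := by
      obtain ⟨k, hk⟩ := hdvd
      have hk1 : 1 ≤ k := by nlinarith [h.1, h.2]
      have he : N / d = k := by rw [hk, Int.mul_ediv_cancel_left _ (by omega : d ≠ 0)]
      omega
    rw [hfd] at ih
    obtain ⟨ia, ib, ic, id'⟩ := ih (h1')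
    have hNd : N / d * d = N := Int.ediv_mul_cancel ((PySem.Int.mod_eq_zero_iff_dvd N d).1 hm)
    simp only [r, hfd]
    refine ⟨?_, ?_, ic, id'⟩
    · simp only [List.length_cons, List.replicate_succ]
      exact congrArg (d :: ·) ia
    · simp only [List.length_cons]
      calc N = N / d * d := hNd.symm
        _ = (pfInner d (N / d)).2 * d ^ (pfInner d (N / d)).1.length * d := by rw [← ib]
        _ = _ := by rw [pow_succ]; ring
  | case2 N h hm =>
    intro h1
    refine ⟨by simp, by simp, ?_, h1⟩
    intro hdvd
    exact hm ((PySem.Int.mod_eq_zero_iff_dvd N d).2 hdvd)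
  | case3 N h =>
    intro h1
    exact absurd ⟨h2, h1⟩ h

theorem pfOuter_spec (N d : Int) : 2 ≤ d → 1 ≤ N →
    (∀ k : Int, 2 ≤ k → k < d → ¬ k ∣ N) →
    (∀ x ∈ pfOuter N d, IsPLike x) ∧ (pfOuter N d).prod = N := by
  fun_induction pfOuter N d with
  | case1 N d h r ih =>
    intro h2 h1 hinv
    simp only [r] at ih ⊢
    obtain ⟨ia, ib, ic, id'⟩ := pfInner_spec d N h2 h1
    have hr2dvd : (pfInner d N).2 ∣ N := ⟨d ^ (pfInner d N).1.length, ib⟩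
    have hinv' : ∀ k : Int, 2 ≤ k → k < d + 1 → ¬ k ∣ (pfInner d N).2 := by
      intro k hk2 hkd hdvd
      rcases (by omega : k < d ∨ k = d) with hlt | heq
      · exact hinv k hk2 hlt (hdvd.trans hr2dvd)
      · rw [heq] at hdvd; exact ic hdvd
    obtain ⟨ja, jb⟩ := ih (by omega) id' hinv'
    constructor
    · intro x hx
      rcases List.mem_append.1 hx with hx1 | hx2
      · have hxd : x = d := by
          rw [ia] at hx1
          exact List.eq_of_mem_replicate hx1
        rw [hxd]
        refine ⟨h2, fun k hk2 hkx hdvd => ?_⟩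
        have hlen : (pfInner d N).1 ≠ [] := by
          intro hnil; rw [hxd, hnil] at hx1; simp at hx1
        have hlz : (pfInner d N).1.length ≠ 0 :=
          fun hc => hlen (List.eq_nil_of_length_eq_zero hc)
        have hpow : d ^ (pfInner d N).1.length ∣ N := by
          refine ⟨(pfInner d N).2, ?_⟩
          conv_lhs => rw [ib]
          ring
        have hddvd : d ∣ N := dvd_trans (dvd_pow_self d hlz) hpow
        exact hinv k hk2 (by omega) (hdvd.trans hddvd)
      · exact ja x hx2
    · have hrep : (pfInner d N).1.prod = d ^ (pfInner d N).1.length := by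
        conv_lhs => rw [ia]
        rw [List.prod_replicate]
      rw [List.prod_append, hrep, jb]
      exact (mul_comm _ _).trans ib.symm
  | case2 N d h hN =>
    intro h2 h1 hinv
    have hlt : N < d * d := by
      by_contra hc
      exact h ⟨by omega, h2⟩
    refine ⟨fun x hx => ?_, by simp⟩
    have hxN : x = N := List.mem_singleton.1 hx
    subst hxN
    exact prime_of_no_small_divisor x d hN h2 hlt hinv
  | case3 N d h hN =>
    intro h2 h1 hinv
    have : N = 1 := by omega
    subst this
    exact ⟨by simp, by simp⟩

theorem primeFactorize_perm (N : Int) :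
    (primeFactorize N).Perm (N.toNat.primeFactorsList.map (fun k : ℕ => (k : Int))) := by
  rcases (by omega : N ≤ 1 ∨ 2 ≤ N) with hN | hN
  · have h1 : pfOuter N 2 = [] := by
      rw [pfOuter]
      rw [dif_neg (by intro hc; omega)]
      rw [if_neg (by omega)]
    have h2 : N.toNat.primeFactorsList = [] := by
      rcases (by omega : N.toNat = 0 ∨ N.toNat = 1) with h | h <;> rw [h] <;> simp
    rw [primeFactorize, h1, h2]
    simp
  · obtain ⟨hel, hprod⟩ := pfOuter_spec N 2 (by omega) (by omega) (by omega)
    set l := pfOuter N 2 with hl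
    have hroundtrip : l.map ((fun k : ℕ => (k : Int)) ∘ Int.toNat) = l := by
      apply List.map_congr_left ?_ |>.trans (List.map_id l)
      intro x hx
      exact Int.toNat_of_nonneg (by have := (hel x hx).1; omega)
    have hprodN : (l.map Int.toNat).prod = N.toNat := by
      have hcast : ((l.map Int.toNat).map (fun k : ℕ => (k : Int))).prod = N := by
        rw [List.map_map, hroundtrip, hprod]
      rw [← Nat.cast_list_prod] at hcast
      omega
    have hperm : (l.map Int.toNat).Perm (N.toNat.primeFactorsList) :=
      Nat.primeFactorsList_unique hprodN (by
        intro p hp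
        obtain ⟨x, hx, hxp⟩ := List.mem_map.1 hp
        have := (isPLike_iff x (hel x hx).1).1 (hel x hx)
        rwa [hxp] at this)
    have hfinal := hperm.map (fun k : ℕ => (k : Int))
    rw [List.map_map, hroundtrip] at hfinal
    exact hfinal

theorem count_primeFactorize (N x : Int) :
    (primeFactorize N).count x =
      if 0 ≤ x then N.toNat.factorization x.toNat else 0 := by
  have hperm := primeFactorize_perm N
  rw [hperm.count_eq]
  by_cases hx : 0 ≤ x
  · rw [if_pos hx]
    have hxc : x = ((x.toNat : ℕ) : Int) := (Int.toNat_of_nonneg hx).symm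
    rw [hxc, List.count_map_of_injective _ _ (fun a b h => by omega),
      Nat.primeFactorsList_count_eq]
    congr 1
  · rw [if_neg hx]
    apply List.count_eq_zero_of_not_mem
    intro hmem
    obtain ⟨k, _, hk⟩ := List.mem_map.1 hmem
    exact hx (hk ▸ Int.natCast_nonneg k)

theorem mergeStep_count (cur s : List Int) (j x : Int) (hj : j ∈ cur) :
    (mergeStep cur s j).count x =
      if x = j then max (s.count x) (cur.count x) else s.count x := by
  have hcur : 0 < cur.count j := List.count_pos_iff.2 hj
  have hfold : ∀ (t : List Int) (diff : Int),
      (PySem.List.pyRange 0 diff 1).foldl (fun t _ => t ++ [j]) t =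
        t ++ List.replicate diff.toNat j := by
    intro t diff
    rw [PySem.List.foldl_append_singleton_eq_map (f := fun _ => j)]
    congr 1
    rw [List.map_const', PySem.List.length_pyRange_one]
    congr 1
    omega
  unfold mergeStep
  by_cases hjs : j ∈ s
  · simp only [if_pos hjs, PySem.List.count_eq, hfold]
    split_ifs with hgt hxj hxj
    · subst hxj
      simp only [List.count_append, List.count_replicate, beq_self_eq_true, if_true]
      omega
    · simp only [List.count_append, List.count_replicate, beq_iff_eq]
      rw [if_neg (fun h : j = x => hxj h.symm)]
      omega
    · subst hxj
      omega
    · rfl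
  · have hs0 : s.count j = 0 := List.count_eq_zero_of_not_mem hjs
    have hmem : j ∈ s ++ [j] := List.mem_append_right s List.mem_cons_self
    simp only [if_neg hjs, if_pos hmem, PySem.List.count_eq, hfold]
    split_ifs with hgt hxj hxj
    · subst hxj
      simp only [List.count_append, List.count_replicate, beq_self_eq_true, if_true,
        List.count_singleton] at hgt ⊢
      omega
    · have h0 : List.count x [j] = 0 := List.count_eq_zero_of_not_mem (by simp [hxj])
      simp only [List.count_append, List.count_replicate, beq_iff_eq, h0] at hgt ⊢
      rw [if_neg (fun h : j = x => hxj h.symm)]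
      omega
    · subst hxj
      have h1 : List.count x [x] = 1 := by simp
      simp only [List.count_append, h1] at hgt ⊢
      omega
    · have h0 : List.count x [j] = 0 := List.count_eq_zero_of_not_mem (by simp [hxj])
      simp only [List.count_append, h0]
      omega

theorem mergeFold_count_aux (cur l : List Int) (hl : ∀ j ∈ l, j ∈ cur) (s : List Int) (x : Int) :
    (l.foldl (fun s j => mergeStep cur s j) s).count x =
      if x ∈ l then max (s.count x) (cur.count x) else s.count x := by
  induction l generalizing s with
  | nil => simp
  | cons y t ih =>
    simp only [List.foldl_cons]
    rw [ih (fun j hj => hl j (List.mem_cons_of_mem _ hj))]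
    rw [mergeStep_count cur s y x (hl y List.mem_cons_self)]
    by_cases hxy : x = y <;> by_cases hxt : x ∈ t <;>
      simp [hxy, hxt, List.mem_cons]

theorem mergeFold_count (cur s : List Int) (x : Int) :
    (cur.foldl (fun s j => mergeStep cur s j) s).count x =
      max (s.count x) (cur.count x) := by
  rw [mergeFold_count_aux cur cur (fun j hj => hj) s x]
  by_cases hx : x ∈ cur
  · rw [if_pos hx]
  · rw [if_neg hx, List.count_eq_zero_of_not_mem hx]
    omega

-- the whole accumulation loop of A, at the level of multiplicities
theorem aSet_count (l : List Int) (s : List Int) (x : Int) :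
    ((l.foldl (fun s i =>
        let cur := primeFactorize i
        cur.foldl (fun s j => mergeStep cur s j) s) s).count x) =
      l.foldl (fun a i => max a ((primeFactorize i).count x)) (s.count x) := by
  induction l generalizing s with
  | nil => rfl
  | cons i t ih =>
    simp only [List.foldl_cons]
    rw [ih]
    congr 1
    exact mergeFold_count _ s x

-- generic bound for a running max
theorem foldl_max_le (l : List Int) (f : Int → Nat) (a b : Nat)
    (h : ∀ x ∈ l, f x ≤ b) (ha : a ≤ b) : l.foldl (fun a x => max a (f x)) a ≤ b := by
  induction l generalizing a with
  | nil => simpa using ha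
  | cons y t ih =>
    simp only [List.foldl_cons]
    exact ih (max a (f y)) (fun x hx => h x (List.mem_cons_of_mem _ hx))
      (Nat.max_le.2 ⟨ha, h y List.mem_cons_self⟩)

theorem isPrimeLoop_spec (p d : Int) (hp : 2 ≤ p) : 2 ≤ d →
    (∀ k : Int, 2 ≤ k → k < d → ¬ k ∣ p) →
    (isPrimeLoop p d = true ↔ IsPLike p) := by
  fun_induction isPrimeLoop p d with
  | case1 d h hm =>
    intro hd hinv
    have hdvd : d ∣ p := (PySem.Int.mod_eq_zero_iff_dvd p d).1 hm
    have hdp : d < p := by nlinarith [h.1]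
    constructor
    · intro hfalse; exact absurd hfalse (by simp)
    · intro hpl; exact absurd (hpl.2 d hd hdp hdvd) (fun h => h)
  | case2 d h hm ih =>
    intro hd hinv
    refine ih (by omega) ?_
    intro k hk2 hkd hdvd
    rcases (by omega : k < d ∨ k = d) with hlt | heq
    · exact hinv k hk2 hlt hdvd
    · rw [heq] at hdvd
      exact hm ((PySem.Int.mod_eq_zero_iff_dvd p d).2 hdvd)
  | case3 d h =>
    intro hd hinv
    have hlt : p < d * d := by
      by_contra hc
      exact h ⟨by omega, hd⟩
    simp only [true_iff]
    exact prime_of_no_small_divisor p d (by omega) hd hlt hinv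

theorem isPrime_iff (p : Int) (hp : 2 ≤ p) : isPrimeLoop p 2 = true ↔ p.toNat.Prime :=
  (isPrimeLoop_spec p 2 hp (le_refl 2) (by omega)).trans (isPLike_iff p hp)

theorem powLoop_spec (p n q e : Int) (hp : 2 ≤ p) : 1 ≤ e → q = p ^ e.toNat → q ≤ n →
    (powLoop p n q e).1 = p ^ ((powLoop p n q e).2).toNat ∧ e ≤ (powLoop p n q e).2 ∧
    (powLoop p n q e).1 ≤ n ∧ n < (powLoop p n q e).1 * p := by
  fun_induction powLoop p n q e with
  | case1 q e h ih =>
    intro he hq hqn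
    have hq' : q * p = p ^ (e + 1).toNat := by
      have : (e + 1).toNat = e.toNat + 1 := by omega
      rw [this, pow_succ, ← hq]
    obtain ⟨ka, kb, kc, kd⟩ := ih (by omega) hq' h.1
    exact ⟨ka, by omega, kc, kd⟩
  | case2 q e h =>
    intro he hq hqn
    have hq1 : 1 ≤ q := by
      rw [hq]; exact one_le_pow₀ (by omega)
    have hng : n < q * p := by
      by_contra hc
      exact h ⟨by omega, hp, hq1⟩
    exact ⟨hq, le_refl e, hqn, hng⟩

-- B's result as one flat map over the candidate range
def bBlock (num p : Int) : List Int :=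
  if isPrimeLoop p 2 then List.replicate ((powLoop p (num - 1) p 1).2).toNat p else []

theorem LCMList_alt_eq_flatMap (num : Int) :
    LCMList_alt num = (PySem.List.pyRange 2 num 1).flatMap (bBlock num) := by
  unfold LCMList_alt
  exact Eq.trans
    (PySem.List.foldl_congr_mem (PySem.List.pyRange 2 num 1)
      (fun res p => if isPrimeLoop p 2 = true then
          res ++ PySem.List.pyRepeat [p] (powLoop p (num - 1) p 1).2 else res)
      (fun res p => res ++ bBlock num p) []
      (fun acc p _ => by
        by_cases hpr : isPrimeLoop p 2 = true <;>
          simp [bBlock, hpr, PySem.List.pyRepeat_singleton]))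
    (by rw [PySem.List.foldl_append_eq_flatMap, List.nil_append])

theorem count_flatMap_const (l : List Int) (g : Int → List Int)
    (hg : ∀ p ∈ l, ∀ y ∈ g p, y = p) (hnd : l.Nodup) (x : Int) :
    (l.flatMap g).count x = if x ∈ l then (g x).length else 0 := by
  induction l with
  | nil => simp
  | cons y t ih =>
    simp only [List.flatMap_cons, List.count_append]
    rw [ih (fun p hp => hg p (List.mem_cons_of_mem _ hp)) (hnd.of_cons)]
    by_cases hxy : x = y
    · subst hxy
      rw [if_pos List.mem_cons_self, if_neg (by
          intro hx
          exact (List.nodup_cons.1 hnd).1 hx)]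
      have : ∀ z ∈ g x, z = x := hg x List.mem_cons_self
      rw [List.count_eq_length.2 (fun z hz => by simp [this z hz]), Nat.add_zero]
    · rw [List.count_eq_zero_of_not_mem (fun hx => hxy ((hg y List.mem_cons_self) x hx)),
        Nat.zero_add]
      simp [List.mem_cons, hxy]

theorem bout_count (num x : Int) :
    ((PySem.List.pyRange 2 num 1).flatMap (bBlock num)).count x =
      if 2 ≤ x ∧ x < num ∧ isPrimeLoop x 2 = true
      then ((powLoop x (num - 1) x 1).2).toNat else 0 := by
  rw [count_flatMap_const _ _
    (fun p _ y hy => by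
      rw [bBlock] at hy
      split at hy
      · exact List.eq_of_mem_replicate hy
      · simp at hy)
    (PySem.List.nodup_pyRange_one 2 num) x]
  by_cases hmem : x ∈ PySem.List.pyRange 2 num 1
  · obtain ⟨h2, hlt⟩ := PySem.List.mem_pyRange_one.1 hmem
    rw [if_pos hmem, bBlock]
    by_cases hpr : isPrimeLoop x 2 = true
    · rw [if_pos hpr, if_pos ⟨h2, hlt, hpr⟩, List.length_replicate]
    · rw [if_neg hpr, if_neg (by rintro ⟨_, _, hc⟩; exact hpr hc), List.length_nil]
  · rw [if_neg hmem, if_neg (by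
      rintro ⟨h2, hlt, _⟩
      exact hmem (PySem.List.mem_pyRange_one.2 ⟨h2, hlt⟩))]

theorem bout_sorted (num : Int) :
    ((PySem.List.pyRange 2 num 1).flatMap (bBlock num)).Pairwise (· ≤ ·) := by
  have hg : ∀ (p y : Int), y ∈ bBlock num p → y = p := by
    intro p y hy
    rw [bBlock] at hy
    split at hy
    · exact List.eq_of_mem_replicate hy
    · simp at hy
  refine List.pairwise_flatMap.2 ⟨?_, ?_⟩
  · intro a _
    rw [bBlock]
    split
    · exact List.pairwise_replicate.2 (Or.inr (le_refl a))
    · exact List.Pairwise.nil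
  · exact (PySem.List.pairwise_lt_pyRange_one 2 num).imp
      (fun hab x hx y hy => by rw [hg _ _ hx, hg _ _ hy]; omega)

-- LCM exponent: the running max of p-adic valuations below num is exactly what powLoop finds
theorem max_exp (num p : Int) (hp : 2 ≤ p) (hplt : p < num) (hprime : p.toNat.Prime) :
    (PySem.List.pyRange 0 num 1).foldl (fun a i => max a ((primeFactorize i).count p)) 0 =
      ((powLoop p (num - 1) p 1).2).toNat := by
  obtain ⟨ha, hb, hc, hd⟩ := powLoop_spec p (num - 1) p 1 hp (by omega)
    (by norm_num) (by omega)
  set E := (powLoop p (num - 1) p 1).2 with hE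
  set e := E.toNat with he
  set P := p.toNat with hP
  have hP2 : 2 ≤ P := by omega
  have hcast : ∀ k : ℕ, (p : Int) ^ k = ((P ^ k : ℕ) : Int) := by
    intro k
    rw [hP]
    push_cast [Int.toNat_of_nonneg (by omega : (0:Int) ≤ p)]
    ring
  have hup : P ^ e ≤ (num - 1).toNat := by
    have := hc
    rw [ha, hcast] at this
    omega
  have hub : (num - 1).toNat < P ^ (e + 1) := by
    have := hd
    rw [ha, ← pow_succ, hcast] at this
    omega
  have hcount : ∀ i : Int, (primeFactorize i).count p = i.toNat.factorization P := by
    intro i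
    rw [count_primeFactorize, if_pos (by omega : (0:Int) ≤ p)]
  apply Nat.le_antisymm
  · apply foldl_max_le
    · intro i hi
      obtain ⟨h0, hlt⟩ := PySem.List.mem_pyRange_one.1 hi
      rw [hcount]
      by_cases hz : i.toNat = 0
      · rw [hz]; simp
      · have hdvd : P ^ (i.toNat.factorization P) ∣ i.toNat := Nat.ordProj_dvd _ _
        have hle : P ^ (i.toNat.factorization P) ≤ i.toNat :=
          Nat.le_of_dvd (by omega) hdvd
        have hlt' : P ^ (i.toNat.factorization P) < P ^ (e + 1) := by omega
        have := (Nat.pow_lt_pow_iff_right (by omega : 1 < P)).1 hlt'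
        omega
    · omega
  · have hi0 : ((P ^ e : ℕ) : Int) ∈ PySem.List.pyRange 0 num 1 := by
      refine PySem.List.mem_pyRange_one.2 ⟨by positivity, ?_⟩
      omega
    have hfact : (primeFactorize ((P ^ e : ℕ) : Int)).count p = e := by
      rw [hcount]
      simp only [Int.toNat_natCast]
      rw [hprime.factorization_pow]
      exact Finsupp.single_eq_same
    have := (PySem.List.le_foldl_max_nat (PySem.List.pyRange 0 num 1)
      (fun i => (primeFactorize i).count p) 0).2 _ hi0
    rw [hfact] at this
    exact this

theorem aFold_zero (num x : Int) (hx : ¬ (2 ≤ x ∧ x < num ∧ x.toNat.Prime)) :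
    (PySem.List.pyRange 0 num 1).foldl (fun a i => max a ((primeFactorize i).count x)) 0 = 0 := by
  apply Nat.le_zero.1
  apply foldl_max_le _ _ _ _ _ (le_refl 0)
  intro i hi
  obtain ⟨h0, hlt⟩ := PySem.List.mem_pyRange_one.1 hi
  rw [count_primeFactorize]
  by_cases hxneg : 0 ≤ x
  · rw [if_pos hxneg]
    by_cases hpr : x.toNat.Prime
    · have hx2 : 2 ≤ x := by
        have := hpr.two_le
        omega
      have hxnum : num ≤ x := by
        by_contra hc
        exact hx ⟨hx2, by omega, hpr⟩
      by_cases hz : i.toNat = 0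
      · rw [hz]
        simp
      · apply Nat.le_zero.2
        rw [Nat.factorization_eq_zero_iff]
        refine Or.inr (Or.inl ?_)
        intro hdvd
        have := Nat.le_of_dvd (by omega) hdvd
        omega
    · rw [Nat.factorization_eq_zero_of_not_prime _ hpr]
  · rw [if_neg hxneg]


-- ===== VERDICT (by name: the statement is the Claim_ definition above) =====
theorem LCMList_spec : Claim_equal_LCMList := by
  intro num _
  unfold Spec_LCMList
  rw [LCMList_alt_eq_flatMap]
  unfold LCMList
  apply PySem.List.sorted_id_eq_of_perm_of_pairwise
  · rw [List.perm_iff_count]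
    intro x
    rw [bout_count, aSet_count]
    by_cases hx : 2 ≤ x ∧ x < num ∧ x.toNat.Prime
    · rw [if_pos ⟨hx.1, hx.2.1, (isPrime_iff x hx.1).2 hx.2.2⟩]
      simpa using (max_exp num x hx.1 hx.2.1 hx.2.2).symm
    · rw [if_neg (by
        rintro ⟨h1, h2, h3⟩
        exact hx ⟨h1, h2, (isPrime_iff x h1).1 h3⟩)]
      simpa using (aFold_zero num x hx).symm
  · exact bout_sorted num
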